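-- pv_equiv track=rewrite | github.com/PKU-YuanGroup/MagicTime | data_preprocess/step3_2_preprocess_video_caption.py | merge_json_files
-- ===== SOURCE A (Python) =====
-- def merge_json_files(info_data, caption_data):
--     # Merge info into caption data based on matching key prefixes
--     for caption_key in caption_data:
--         for info_key in info_data:
--             if caption_key.startswith(info_key):
--                 selected_info = {key: info_data[info_key][key] for key in ['title'] if
--                                  key in info_data[info_key]}
--                 caption_data[caption_key].update(selected_info)
--
--                 break
--     return caption_data
-- ===== SOURCE B (Python) =====
-- def merge_json_files(info_data, caption_data):
--     # Index each info key by its insertion position; for each caption key scan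
--     # its prefixes (O(len) dict probes) and take the hit with minimal position.
--     index = {key: (i, value) for i, (key, value) in enumerate(info_data.items())}
--     for caption_key in caption_data:
--         best = index.get("")
--         prefix = ""
--         for ch in caption_key:
--             prefix += ch
--             hit = index.get(prefix)
--             if hit is not None and (best is None or hit[0] < best[0]):
--                 best = hit
--         if best is not None and 'title' in best[1]:
--             caption_data[caption_key]['title'] = best[1]['title']
--     return caption_data
-- ===== Notes on version B (the rewrite author's own statement) =====
-- stated objective: faster
-- what changed: Instead of scanning all info keys for every caption key, B builds one dict indexing each info key by its insertion position and, per caption key, probes only that key's prefixes, keeping the hit with minimal position (same key A's first-match scan finds).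
import Mathlib
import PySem

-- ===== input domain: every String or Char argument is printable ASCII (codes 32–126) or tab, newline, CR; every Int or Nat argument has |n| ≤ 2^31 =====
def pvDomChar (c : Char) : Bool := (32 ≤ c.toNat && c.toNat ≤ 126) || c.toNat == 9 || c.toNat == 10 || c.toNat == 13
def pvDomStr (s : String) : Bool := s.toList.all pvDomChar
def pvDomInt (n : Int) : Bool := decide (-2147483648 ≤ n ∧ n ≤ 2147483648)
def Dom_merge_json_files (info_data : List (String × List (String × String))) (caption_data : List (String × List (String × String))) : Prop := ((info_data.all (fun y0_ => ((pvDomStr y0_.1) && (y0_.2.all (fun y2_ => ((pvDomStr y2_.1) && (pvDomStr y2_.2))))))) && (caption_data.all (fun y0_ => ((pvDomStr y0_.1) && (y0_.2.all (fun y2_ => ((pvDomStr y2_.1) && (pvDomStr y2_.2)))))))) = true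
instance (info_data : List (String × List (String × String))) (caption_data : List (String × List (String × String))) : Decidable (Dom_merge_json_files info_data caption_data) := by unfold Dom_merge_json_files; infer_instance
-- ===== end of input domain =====

-- B replaces A's scan of ALL info keys per caption key by one position-indexed dict of the
-- info keys probed only at the caption key's prefixes (objective: faster).
-- Both Pythons mutate caption_data's inner dicts in place and return caption_data; the
-- ports model that shared behaviour on the returned value (B performs the same mutation).

-- Shared type-convention adapter: the Python arguments are dicts of dicts; an association
-- list is read the way Python's dict() reads it (later duplicate keys overwrite in place).
def pvToDict (l : List (String × List (String × String))) : PySem.Dict String (PySem.Dict String String) :=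
  PySem.Dict.ofList (l.map (fun p => (p.1, PySem.Dict.ofList p.2)))

def pvItems (d : PySem.Dict String (PySem.Dict String String)) : List (String × List (String × String)) :=
  d.items.map (fun p => (p.1, p.2.items))

-- ===== PORT A =====
-- inner 'for info_key in info_data: if caption_key.startswith(info_key): …; break'
def aFindInfo (items : List (String × PySem.Dict String String)) (ck : String) : Option (PySem.Dict String String) :=
  match items with
  | [] => none
  | (ik, iv) :: rest => if PySem.Str.startswith ck ik then some iv else aFindInfo rest ck

def merge_json_files (info_data : List (String × List (String × String))) (caption_data : List (String × List (String × String))) : List (String × List (String × String)) :=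
  let idd := pvToDict info_data
  let cd := pvToDict caption_data
  -- for caption_key in caption_data: …  (selected_info has at most the 'title' key;
  -- update(selected_info) with no 'title' leaves the inner dict unchanged)
  pvItems (cd.items.foldl (fun acc p =>
    match aFindInfo idd.items p.1 with
    | some iv =>
      match iv.get? "title" with
      | some t => acc.insert p.1 (p.2.insert "title" t)
      | none => acc
    | none => acc) cd)

-- ===== PORT B =====
-- index = {key: (i, value) for i, (key, value) in enumerate(info_data.items())}
def bIndex (items : List (String × PySem.Dict String String)) : PySem.Dict String (Int × PySem.Dict String String) :=
  PySem.Dict.ofList ((PySem.List.enumerate items).map (fun q => (q.2.1, (q.1, q.2.2))))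

-- loop body: prefix += ch; hit = index.get(prefix); keep the hit of minimal position
def bStep (index : PySem.Dict String (Int × PySem.Dict String String))
    (st : Option (Int × PySem.Dict String String) × List Char) (ch : Char) :
    Option (Int × PySem.Dict String String) × List Char :=
  let pre := st.2 ++ [ch]
  match index.get? (String.ofList pre) with
  | some hit =>
    match st.1 with
    | some b => if hit.1 < b.1 then (some hit, pre) else (some b, pre)
    | none => (some hit, pre)
  | none => (st.1, pre)

def bBest (index : PySem.Dict String (Int × PySem.Dict String String)) (ck : String) :
    Option (Int × PySem.Dict String String) :=
  (ck.toList.foldl (bStep index) (index.get? "", [])).1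

def merge_json_files_alt (info_data : List (String × List (String × String))) (caption_data : List (String × List (String × String))) : List (String × List (String × String)) :=
  let idd := pvToDict info_data
  let index := bIndex idd.items
  let cd := pvToDict caption_data
  pvItems (cd.items.foldl (fun acc p =>
    match bBest index p.1 with
    | some hit =>
      match hit.2.get? "title" with
      | some t => acc.insert p.1 (p.2.insert "title" t)
      | none => acc
    | none => acc) cd)

-- ===== PRECONDITION & SPEC =====
def Spec_merge_json_files (info_data : List (String × List (String × String))) (caption_data : List (String × List (String × String))) (out : List (String × List (String × String))) : Prop := out = merge_json_files_alt info_data caption_data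
instance (info_data : List (String × List (String × String))) (caption_data : List (String × List (String × String))) (out : List (String × List (String × String))) : Decidable (Spec_merge_json_files info_data caption_data out) := by unfold Spec_merge_json_files; infer_instance

-- ===== CLAIM (what is proved, stated in full; the proofs are below) =====
def Claim_equal_merge_json_files : Prop := ∀ (info_data : List (String × List (String × String))) (caption_data : List (String × List (String × String))), Dom_merge_json_files info_data caption_data → Spec_merge_json_files info_data caption_data (merge_json_files info_data caption_data)

-- ===== LEMMAS AND PROOFS =====

-- ofList of a list with pairwise-distinct keys keeps it as-is
theorem pv_items_ofList {κ ν : Type} [BEq κ] [LawfulBEq κ] (ml : List (κ × ν))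
    (h : (ml.map Prod.fst).Nodup) : (PySem.Dict.ofList ml).items = ml := by
  induction ml using List.reverseRecOn with
  | nil => rfl
  | append_singleton xs x ih =>
    rw [List.map_append] at h
    rcases List.nodup_append.mp h with ⟨h1, _, h3⟩
    have ihx := ih h1
    have hnc : (PySem.Dict.ofList xs).contains x.1 = false := by
      rw [Bool.eq_false_iff]
      intro hc
      have hk := (PySem.Dict.contains_iff_mem_keys _ _).mp hc
      simp only [PySem.Dict.keys, ihx] at hk
      rcases List.mem_map.mp hk with ⟨p, hp, hpe⟩
      exact h3 p.1 (List.mem_map_of_mem hp) x.1 (by simp) hpe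
    have hstep : PySem.Dict.ofList (xs ++ [x]) = (PySem.Dict.ofList xs).insert x.1 x.2 := by
      simp [PySem.Dict.ofList, PySem.Dict.update, List.foldl_append]
    rw [hstep, PySem.Dict.items_insert_of_not_contains _ _ hnc, ihx]

-- B's minimum-keeping combiner, extracted for reasoning
def pvMin2 (b : Option (Int × PySem.Dict String String)) (h : Int × PySem.Dict String String) :
    Option (Int × PySem.Dict String String) :=
  match b with
  | none => some h
  | some b' => if h.1 < b'.1 then some h else some b'

-- the nonempty prefixes probed by B's char loop starting from accumulated prefix p0
def pvPrefs (p0 : List Char) : List Char → List (List Char)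
  | [] => []
  | c :: cs => (p0 ++ [c]) :: pvPrefs (p0 ++ [c]) cs

theorem pv_fold_eq_prefs (index : PySem.Dict String (Int × PySem.Dict String String)) :
    ∀ (cs : List Char) (b0 : Option (Int × PySem.Dict String String)) (p0 : List Char),
      (cs.foldl (bStep index) (b0, p0)).1 =
        (pvPrefs p0 cs).foldl
          (fun b pre => match index.get? (String.ofList pre) with
                        | some h => pvMin2 b h
                        | none => b) b0 := by
  intro cs
  induction cs with
  | nil => intro b0 p0; rfl
  | cons c cs ih =>
    intro b0 p0
    have hb : bStep index (b0, p0) c =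
        ((match index.get? (String.ofList (p0 ++ [c])) with
          | some h => pvMin2 b0 h
          | none => b0), p0 ++ [c]) := by
      simp only [bStep, pvMin2]
      cases index.get? (String.ofList (p0 ++ [c])) with
      | none => rfl
      | some hit =>
        cases b0 with
        | none => rfl
        | some b' => by_cases hlt : hit.1 < b'.1 <;> simp [hlt]
    simp only [List.foldl_cons, pvPrefs, hb, ih]

theorem pv_prefsFold_eq_filterMap (index : PySem.Dict String (Int × PySem.Dict String String)) :
    ∀ (l : List (List Char)) (b0 : Option (Int × PySem.Dict String String)),
      l.foldl (fun b pre => match index.get? (String.ofList pre) with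
                            | some h => pvMin2 b h
                            | none => b) b0 =
      (l.filterMap (fun pre => index.get? (String.ofList pre))).foldl pvMin2 b0 := by
  intro l
  induction l with
  | nil => intro b0; rfl
  | cons pre l ih =>
    intro b0
    cases hg : index.get? (String.ofList pre) <;>
      simp [hg, ih]

theorem pv_min2_none_iff : ∀ (l : List (Int × PySem.Dict String String))
    (b0 : Option (Int × PySem.Dict String String)),
    l.foldl pvMin2 b0 = none ↔ b0 = none ∧ l = [] := by
  intro l
  induction l with
  | nil => intro b0; simp
  | cons h l ih =>
    intro b0
    have hns : pvMin2 b0 h ≠ none := by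
      cases b0 with
      | none => simp [pvMin2]
      | some b' => by_cases hlt : h.1 < b'.1 <;> simp [pvMin2, hlt]
    simp [List.foldl_cons, ih, hns]

theorem pv_min2_mem : ∀ (l : List (Int × PySem.Dict String String))
    (b0 : Option (Int × PySem.Dict String String)) (r : Int × PySem.Dict String String),
    l.foldl pvMin2 b0 = some r → r ∈ b0.toList ++ l := by
  intro l
  induction l with
  | nil => intro b0 r hr; cases b0 <;> simp_all
  | cons hd tl ih =>
    intro b0 r hr
    simp only [List.foldl_cons] at hr
    have hmem := ih (pvMin2 b0 hd) r hr
    rcases List.mem_append.mp hmem with hin | hin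
    · cases b0 with
      | none =>
        simp only [pvMin2, Option.toList_some, List.mem_singleton] at hin
        simp [hin]
      | some b' =>
        by_cases hlt : hd.1 < b'.1 <;>
          simp only [pvMin2, hlt, if_true, if_false,
            Option.toList_some, List.mem_singleton] at hin <;>
          simp [hin]
    · simp [List.mem_append, List.mem_cons, hin]
theorem pv_min2_le : ∀ (l : List (Int × PySem.Dict String String))
    (b0 : Option (Int × PySem.Dict String String)) (r : Int × PySem.Dict String String),
    l.foldl pvMin2 b0 = some r → ∀ y ∈ b0.toList ++ l, r.1 ≤ y.1 := by
  intro l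
  induction l with
  | nil =>
    intro b0 r hr y hy
    cases b0 <;> simp_all
  | cons hd tl ih =>
    intro b0 r hr y hy
    simp only [List.foldl_cons] at hr
    have hle := ih (pvMin2 b0 hd) r hr
    have htl : ∀ z ∈ tl, r.1 ≤ z.1 := by
      intro z hz
      exact hle z (List.mem_append.mpr (Or.inr hz))
    obtain ⟨m, hmval⟩ : ∃ m, pvMin2 b0 hd = some m := by
      cases b0 with
      | none => exact ⟨hd, rfl⟩
      | some b' => by_cases hlt : hd.1 < b'.1 <;> simp [pvMin2, hlt]
    have hrm : r.1 ≤ m.1 := hle m (by simp [hmval])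
    have hmhd : m.1 ≤ hd.1 ∧ ∀ b', b0 = some b' → m.1 ≤ b'.1 := by
      cases b0 with
      | none =>
        simp only [pvMin2, Option.some.injEq] at hmval
        subst hmval
        exact ⟨le_refl _, by intro b' hb'; cases hb'⟩
      | some b' =>
        by_cases hlt : hd.1 < b'.1 <;>
          simp only [pvMin2, hlt, if_true, if_false, Option.some.injEq] at hmval <;>
          subst hmval
        · exact ⟨le_refl _, by intro c hc; cases hc; omega⟩
        · exact ⟨by omega, by intro c hc; cases hc; exact le_refl _⟩
    rcases List.mem_append.mp hy with hy | hy
    · cases b0 with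
      | none => simp at hy
      | some b' =>
        simp only [Option.toList_some, List.mem_singleton] at hy
        subst hy
        exact le_trans hrm (hmhd.2 y rfl)
    · rcases List.mem_cons.mp hy with rfl | hy
      · exact le_trans hrm hmhd.1
      · exact htl y hy
theorem pv_mem_prefs : ∀ (cs p0 p : List Char),
    p ∈ pvPrefs p0 cs ↔ ∃ t, t ≠ [] ∧ t <+: cs ∧ p = p0 ++ t := by
  intro cs
  induction cs with
  | nil =>
    intro p0 p
    simp only [pvPrefs, List.not_mem_nil, false_iff]
    rintro ⟨t, hne, hp, rfl⟩
    exact hne (List.prefix_nil.mp hp)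
  | cons c cs ih =>
    intro p0 p
    simp only [pvPrefs, List.mem_cons, ih]
    constructor
    · rintro (rfl | ⟨t, hne, hp, rfl⟩)
      · exact ⟨[c], by simp, by simp [List.cons_prefix_cons], rfl⟩
      · exact ⟨c :: t, by simp, by simp [List.cons_prefix_cons, hp], by simp⟩
    · rintro ⟨t, hne, hp, rfl⟩
      cases t with
      | nil => exact absurd rfl hne
      | cons a t' =>
        rcases List.cons_prefix_cons.mp hp with ⟨rfl, hp'⟩
        cases t' with
        | nil => left; rfl
        | cons b t'' =>
          right
          exact ⟨b :: t'', by simp, hp', by simp⟩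

-- A's inner loop is the head of the filtered enumeration
theorem pv_aFind_eq (ck : String) : ∀ (il : List (String × PySem.Dict String String)) (s : Int),
    aFindInfo il ck =
      (((PySem.List.enumerate il s).filter (fun q => PySem.Str.startswith ck q.2.1)).head?).map
        (fun q => q.2.2) := by
  intro il
  induction il with
  | nil => intro s; rfl
  | cons hd rest ih =>
    intro s
    obtain ⟨ik, iv⟩ := hd
    rw [PySem.List.enumerate_cons]
    cases hsw : PySem.Chars.startswith ck.toList ik.toList with
    | true => simp [aFindInfo, PySem.Str.startswith_eq, hsw]
    | false => simp [aFindInfo, PySem.Str.startswith_eq, hsw, ih (s + 1)]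

-- the index dict looks up exactly the enumerated entries
theorem pv_get_bIndex (il : List (String × PySem.Dict String String))
    (hnd : (il.map Prod.fst).Nodup) (k : String) (r : Int × PySem.Dict String String) :
    (bIndex il).get? k = some r ↔ (k, r) ∈ (PySem.List.enumerate il).map (fun q => (q.2.1, (q.1, q.2.2))) := by
  have hml : (((PySem.List.enumerate il).map (fun q => (q.2.1, (q.1, q.2.2)))).map Prod.fst).Nodup := by
    have h1 : ((PySem.List.enumerate il).map (fun q => (q.2.1, (q.1, q.2.2)))).map Prod.fst
        = ((PySem.List.enumerate il).map (fun q => q.2)).map Prod.fst := by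
      simp only [List.map_map]; rfl
    rw [h1, PySem.List.map_snd_enumerate]
    exact hnd
  have hitems : (bIndex il).items = (PySem.List.enumerate il).map (fun q => (q.2.1, (q.1, q.2.2))) :=
    pv_items_ofList _ hml
  have hkeys : (bIndex il).keys.Nodup := PySem.Dict.nodup_keys_ofList _
  rw [PySem.Dict.get?_eq_some_iff_mem_items (bIndex il) k r hkeys, hitems]

-- central lemma: B's best hit carries the same info dict A's first-match scan finds
theorem pv_select_eq (il : List (String × PySem.Dict String String))
    (hnd : (il.map Prod.fst).Nodup) (ck : String) :
    (bBest (bIndex il) ck).map (fun h => h.2) = aFindInfo il ck := by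
  classical
  have hempty : ("" : String) = String.ofList [] := rfl
  have hbb : bBest (bIndex il) ck =
      ((([] : List Char) :: pvPrefs [] ck.toList).filterMap
          (fun pre => (bIndex il).get? (String.ofList pre))).foldl pvMin2 none := by
    have h1 := pv_fold_eq_prefs (bIndex il) ck.toList ((bIndex il).get? "") []
    rw [bBest, h1, pv_prefsFold_eq_filterMap, List.filterMap_cons]
    cases hg : (bIndex il).get? (String.ofList ([] : List Char)) with
    | none => rfl
    | some h0 => rfl
  have hpre : ∀ p : List Char, p ∈ (([] : List Char) :: pvPrefs [] ck.toList) ↔ p <+: ck.toList := by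
    intro p
    simp only [List.mem_cons, pv_mem_prefs]
    constructor
    · rintro (rfl | ⟨t, hne, hp, rfl⟩)
      · exact List.nil_prefix
      · simpa using hp
    · intro hp
      cases p with
      | nil => left; rfl
      | cons a t => right; exact ⟨a :: t, by simp, hp, by simp⟩
  have hmem : ∀ r, r ∈ ((([] : List Char) :: pvPrefs [] ck.toList).filterMap
        (fun pre => (bIndex il).get? (String.ofList pre))) ↔
      ∃ q ∈ PySem.List.enumerate il 0, PySem.Str.startswith ck q.2.1 = true ∧ r = (q.1, q.2.2) := by
    intro r
    rw [List.mem_filterMap]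
    constructor
    · rintro ⟨pre, hpm, hg⟩
      have hmm := (pv_get_bIndex il hnd _ r).mp hg
      rcases List.mem_map.mp hmm with ⟨q, hq, hqe⟩
      have hkey : q.2.1 = String.ofList pre := congrArg Prod.fst hqe
      have hr : r = (q.1, q.2.2) := (congrArg Prod.snd hqe).symm
      have hpl : pre = q.2.1.toList := by rw [hkey, String.toList_ofList]
      refine ⟨q, hq, ?_, hr⟩
      rw [PySem.Str.startswith_eq, PySem.Chars.startswith_iff, ← hpl]
      exact (hpre pre).mp hpm
    · rintro ⟨q, hq, hsw, rfl⟩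
      refine ⟨q.2.1.toList, ?_, ?_⟩
      · rw [hpre]
        rw [PySem.Str.startswith_eq, PySem.Chars.startswith_iff] at hsw
        exact hsw
      · rw [pv_get_bIndex il hnd]
        have : (String.ofList q.2.1.toList, ((q.1, q.2.2) : Int × PySem.Dict String String)) = (q.2.1, (q.1, q.2.2)) := by
          simp
        rw [this]
        exact List.mem_map_of_mem hq
  rw [pv_aFind_eq ck il 0, hbb]
  cases hm : ((PySem.List.enumerate il 0).filter (fun q => PySem.Str.startswith ck q.2.1)).head? with
  | none =>
    have hmn : ((PySem.List.enumerate il 0).filter (fun q => PySem.Str.startswith ck q.2.1)) = [] :=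
      List.head?_eq_none_iff.mp hm
    have hcand : ((([] : List Char) :: pvPrefs [] ck.toList).filterMap
        (fun pre => (bIndex il).get? (String.ofList pre))) = [] := by
      apply List.eq_nil_iff_forall_not_mem.mpr
      intro r hr
      rcases (hmem r).mp hr with ⟨q, hq, hsw, rfl⟩
      have : q ∈ ((PySem.List.enumerate il 0).filter (fun q => PySem.Str.startswith ck q.2.1)) :=
        List.mem_filter.mpr ⟨hq, hsw⟩
      rw [hmn] at this
      exact List.not_mem_nil this
    rw [hcand]
    rfl
  | some q0 =>
    obtain ⟨tl, htl⟩ : ∃ tl, ((PySem.List.enumerate il 0).filter (fun q => PySem.Str.startswith ck q.2.1)) = q0 :: tl := by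
      cases hls : ((PySem.List.enumerate il 0).filter (fun q => PySem.Str.startswith ck q.2.1)) with
      | nil => rw [hls] at hm; simp at hm
      | cons a tl =>
        rw [hls] at hm
        simp at hm
        exact ⟨tl, by rw [hm]⟩
    have hq0mem : q0 ∈ ((PySem.List.enumerate il 0).filter (fun q => PySem.Str.startswith ck q.2.1)) := by
      rw [htl]; exact List.mem_cons_self
    have hq0 := List.mem_filter.mp hq0mem
    have hq0cand : ((q0.1, q0.2.2) : Int × PySem.Dict String String) ∈
        ((([] : List Char) :: pvPrefs [] ck.toList).filterMap
          (fun pre => (bIndex il).get? (String.ofList pre))) :=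
      (hmem _).mpr ⟨q0, hq0.1, hq0.2, rfl⟩
    have hmin : ∀ y ∈ ((PySem.List.enumerate il 0).filter (fun q => PySem.Str.startswith ck q.2.1)), q0.1 ≤ y.1 := by
      have hpw := (PySem.List.pairwise_lt_enumerate il 0).filter (fun q => PySem.Str.startswith ck q.2.1)
      rw [htl] at hpw
      intro y hy
      rw [htl] at hy
      rcases List.mem_cons.mp hy with rfl | hy
      · exact le_refl _
      · exact le_of_lt ((List.pairwise_cons.mp hpw).1 y hy)
    -- B's fold returns some r
    cases hfr : ((([] : List Char) :: pvPrefs [] ck.toList).filterMap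
        (fun pre => (bIndex il).get? (String.ofList pre))).foldl pvMin2 none with
    | none =>
      rcases (pv_min2_none_iff _ _).mp hfr with ⟨_, hnil⟩
      rw [hnil] at hq0cand
      exact absurd hq0cand List.not_mem_nil
    | some r =>
      have hrmem := pv_min2_mem _ _ _ hfr
      simp only [Option.toList_none, List.nil_append] at hrmem
      have hrle := pv_min2_le _ _ _ hfr
      simp only [Option.toList_none, List.nil_append] at hrle
      rcases (hmem r).mp hrmem with ⟨q, hq, hsw, rfl⟩
      have hq1 : q.1 ≤ q0.1 := hrle _ hq0cand
      have hq2 : q0.1 ≤ q.1 :=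
        hmin q (List.mem_filter.mpr ⟨hq, hsw⟩)
      have hqq : q = q0 := by
        rcases (PySem.List.mem_enumerate_iff il 0 q).mp hq with ⟨k, hk, rfl⟩
        rcases (PySem.List.mem_enumerate_iff il 0 q0).mp hq0.1 with ⟨k0, hk0, rfl⟩
        have : k = k0 := by
          simp only at hq1 hq2
          omega
        subst this
        rfl
      rw [hqq]
      rfl

-- ===== VERDICT (by name: the statement is the Claim_ definition above) =====
theorem merge_json_files_spec : Claim_equal_merge_json_files := by
  intro info_data caption_data _
  unfold Spec_merge_json_files
  simp only [merge_json_files, merge_json_files_alt]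
  have hnd : ((pvToDict info_data).items.map Prod.fst).Nodup := by
    have h := PySem.Dict.nodup_keys_ofList (info_data.map (fun p => (p.1, PySem.Dict.ofList p.2)))
    simpa [PySem.Dict.keys, pvToDict] using h
  congr 1
  apply PySem.List.foldl_congr_mem
  intro acc p _
  have hsel := pv_select_eq (pvToDict info_data).items hnd p.1
  cases hb : bBest (bIndex (pvToDict info_data).items) p.1 with
  | none =>
    have ha : aFindInfo (pvToDict info_data).items p.1 = none := by rw [← hsel, hb]; rfl
    rw [ha]
  | some hit =>
    have ha : aFindInfo (pvToDict info_data).items p.1 = some hit.2 := by rw [← hsel, hb]; rfl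
    rw [ha]
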